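-- pv_equiv track=rewrite | github.com/rakshithmuda22/agentprobe | src/profiles/style_generator.py | check_import_order
-- ===== SOURCE A (Python) =====
-- def check_import_order(categories: list[str], expected_order: list[str]) -> list[int]:
--     """Check if import categories follow the expected ordering.
--
--     Returns list of line indices where ordering is violated.
--     """
--     violations = []
--     if not expected_order or not categories:
--         return violations
--
--     order_map = {cat: i for i, cat in enumerate(expected_order)}
--
--     max_seen_rank = -1
--     for i, cat in enumerate(categories):
--         rank = order_map.get(cat, len(expected_order))
--         if rank < max_seen_rank:
--             violations.append(i)
--         else:
--             max_seen_rank = rank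
--
--     return violations
-- ===== SOURCE B (Python) =====
-- def check_import_order(categories: list[str], expected_order: list[str]) -> list[int]:
--     """Check if import categories follow the expected ordering.
--
--     Returns list of line indices where ordering is violated.
--     (Build-table-then-scan decomposition: rank list, materialized
--     inclusive prefix-maximum table, then an index scan.)
--     """
--     if not expected_order or not categories:
--         return []
--
--     n = len(expected_order)
--     order_map = {cat: i for i, cat in enumerate(expected_order)}
--     ranks = [order_map.get(c, n) for c in categories]
--
--     prefix_max = []
--     m = -1
--     for r in ranks:
--         if r > m:
--             m = r
--         prefix_max.append(m)
--
--     return [i for i in range(1, len(ranks)) if ranks[i] < prefix_max[i - 1]]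
-- ===== Notes on version B (the rewrite author's own statement) =====
-- stated objective: alternative
-- what changed: Replaces A's single fused loop (running max interleaved with violation collection) by a build-table-then-scan decomposition: a rank list, a materialized inclusive prefix-maximum table, then a separate index scan emitting each i >= 1 with ranks[i] < prefix_max[i-1].
import Mathlib
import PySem

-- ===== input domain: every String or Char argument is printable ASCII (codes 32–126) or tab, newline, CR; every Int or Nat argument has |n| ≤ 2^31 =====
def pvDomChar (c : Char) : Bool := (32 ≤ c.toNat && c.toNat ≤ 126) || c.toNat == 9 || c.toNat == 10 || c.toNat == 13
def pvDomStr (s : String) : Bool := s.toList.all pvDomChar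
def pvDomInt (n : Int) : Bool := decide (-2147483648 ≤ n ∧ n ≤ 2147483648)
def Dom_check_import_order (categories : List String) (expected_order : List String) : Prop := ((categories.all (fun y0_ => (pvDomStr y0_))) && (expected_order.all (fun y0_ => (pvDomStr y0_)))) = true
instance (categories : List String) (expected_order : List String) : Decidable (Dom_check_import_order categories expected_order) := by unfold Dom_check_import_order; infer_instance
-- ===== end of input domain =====

-- B replaces A's fused running-max loop by a build-table-then-scan decomposition
-- (rank list, materialized prefix-maximum table, separate index scan); alternative, not faster.

-- ===== PORT A =====
def check_import_order (categories : List String) (expected_order : List String) : List Int :=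
  if expected_order = [] ∨ categories = [] then []
  else
    let order_map : PySem.Dict String Int :=
      (PySem.List.enumerate expected_order 0).foldl (fun d p => d.insert p.2 p.1) PySem.Dict.empty
    ((PySem.List.enumerate categories 0).foldl
      (fun (st : Int × List Int) p =>
        let rank := order_map.getD p.2 (expected_order.length : Int)
        if rank < st.1 then (st.1, st.2 ++ [p.1]) else (rank, st.2))
      (-1, [])).2

-- ===== PORT B =====
def check_import_order_alt (categories : List String) (expected_order : List String) : List Int :=
  if expected_order = [] ∨ categories = [] then []
  else
    let n : Int := (expected_order.length : Int)
    let order_map : PySem.Dict String Int :=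
      (PySem.List.enumerate expected_order 0).foldl (fun d p => d.insert p.2 p.1) PySem.Dict.empty
    let ranks : List Int := categories.map (fun c => order_map.getD c n)
    let prefix_max : List Int :=
      (ranks.foldl (fun (st : Int × List Int) r =>
        let m := if r > st.1 then r else st.1
        (m, st.2 ++ [m])) (-1, [])).2
    (PySem.List.pyRange 1 (ranks.length : Int) 1).foldl
      (fun acc i =>
        if PySem.List.pyGetD ranks i 0 < PySem.List.pyGetD prefix_max (i - 1) 0 then acc ++ [i]
        else acc) []

-- ===== PRECONDITION & SPEC =====
def Spec_check_import_order (categories : List String) (expected_order : List String) (out : List Int) : Prop := out = check_import_order_alt categories expected_order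
instance (categories : List String) (expected_order : List String) (out : List Int) : Decidable (Spec_check_import_order categories expected_order out) := by unfold Spec_check_import_order; infer_instance

-- ===== CLAIM (what is proved, stated in full; the proofs are below) =====
def Claim_equal_check_import_order : Prop := ∀ (categories : List String) (expected_order : List String), Dom_check_import_order categories expected_order → Spec_check_import_order categories expected_order (check_import_order categories expected_order)

-- ===== LEMMAS AND PROOFS =====

/-- Reference recursion: A's loop body on the list of ranks (state = max seen rank). -/
def pvSpec (m : Int) (k : Int) : List Int → List Int
  | [] => []
  | r :: rs => if r < m then k :: pvSpec m (k + 1) rs else pvSpec r (k + 1) rs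

/-- Inclusive running-maximum table (B's `prefix_max`). -/
def pvPmax (m : Int) : List Int → List Int
  | [] => []
  | r :: rs => (if r > m then r else m) :: pvPmax (if r > m then r else m) rs

/-- A's loop body, on pairs (index, rank). -/
def pvStepA (st : Int × List Int) (p : Int × Int) : Int × List Int :=
  if p.2 < st.1 then (st.1, st.2 ++ [p.1]) else (p.2, st.2)

theorem pvEnumerate_map (xs : List String) (f : String → Int) (s : Int) :
    PySem.List.enumerate (xs.map f) s = (PySem.List.enumerate xs s).map (fun p => (p.1, f p.2)) := by
  induction xs generalizing s with
  | nil => simp [PySem.List.enumerate_nil]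
  | cons x xs ih => simp [PySem.List.enumerate_cons, ih]

theorem pvAscan (rs : List Int) : ∀ (s m : Int) (acc : List Int),
    ((PySem.List.enumerate rs s).foldl pvStepA (m, acc)).2 = acc ++ pvSpec m s rs := by
  induction rs with
  | nil => intro s m acc; simp [PySem.List.enumerate_nil, pvSpec]
  | cons r rs ih =>
    intro s m acc
    rw [PySem.List.enumerate_cons, List.foldl_cons]
    by_cases hrm : r < m
    · simp [pvStepA, pvSpec, hrm, ih]
    · simp [pvStepA, pvSpec, hrm, ih]

theorem pvPmaxFold (rs : List Int) : ∀ (m : Int) (v : List Int),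
    (rs.foldl (fun (st : Int × List Int) r =>
        let m := if r > st.1 then r else st.1
        (m, st.2 ++ [m])) (m, v)).2 = v ++ pvPmax m rs := by
  induction rs with
  | nil => intro m v; simp [pvPmax]
  | cons r rs ih => intro m v; simp [pvPmax, ih]

theorem pvGetD_append_len (pre l2 : List Int) (r : Int) :
    (pre ++ r :: l2).getD pre.length 0 = r := by
  simp [List.getD]

theorem pvGetD_append_last (l1 l2 : List Int) (h : l1 ≠ []) :
    (l1 ++ l2).getD (l1.length - 1) 0 = l1.getLast h := by
  have hp : 0 < l1.length := List.length_pos_of_ne_nil h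
  rw [List.getD, List.getElem?_append_left (by omega), List.getLast_eq_getElem]
  simp [List.getElem?_eq_getElem (by omega : l1.length - 1 < l1.length)]

theorem pvBscan (rs : List Int) : ∀ (pre preP acc : List Int) (m : Int),
    preP.length = pre.length → ∀ (hne : preP ≠ []), preP.getLast hne = m →
    (PySem.List.pyRange (pre.length : Int) ((pre.length + rs.length : Nat) : Int) 1).foldl
      (fun acc i =>
        if PySem.List.pyGetD (pre ++ rs) i 0 < PySem.List.pyGetD (preP ++ pvPmax m rs) (i - 1) 0
        then acc ++ [i] else acc) acc
    = acc ++ pvSpec m (pre.length : Int) rs := by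
  induction rs with
  | nil =>
    intro pre preP acc m _ hne _
    rw [PySem.List.pyRange_one_eq_nil (by simp)]
    simp [pvSpec]
  | cons r rs ih =>
    intro pre preP acc m hlen hne hlast
    have hple : 0 < preP.length := List.length_pos_of_ne_nil hne
    rw [PySem.List.pyRange_one_cons (by push_cast [List.length_cons]; omega), List.foldl_cons]
    have h1 : PySem.List.pyGetD (pre ++ r :: rs) ((pre.length : Nat) : Int) 0 = r := by
      rw [PySem.List.pyGetD_natCast]; exact pvGetD_append_len pre rs r
    have hcast : ((pre.length : Nat) : Int) - 1 = ((preP.length - 1 : Nat) : Int) := by omega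
    have h2 : PySem.List.pyGetD (preP ++ pvPmax m (r :: rs)) (((pre.length : Nat) : Int) - 1) 0 = m := by
      rw [hcast, PySem.List.pyGetD_natCast, pvGetD_append_last preP _ hne, hlast]
    simp only [h1, h2]
    by_cases hrm : r < m
    · have hm' : (if r > m then r else m) = m := by omega
      have hpm : pvPmax m (r :: rs) = m :: pvPmax m rs := by rw [pvPmax, hm']
      rw [if_pos hrm, hpm]
      have hlast' : (preP ++ [m]).getLast (by simp) = m := by simp
      have := ih (pre ++ [r]) (preP ++ [m]) (acc ++ [((pre.length : Nat) : Int)]) m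
        (by simp [hlen]) (by simp) hlast'
      rw [pvSpec, if_pos hrm]
      simpa [List.append_assoc, add_assoc, add_comm, add_left_comm] using this
    · have hm' : (if r > m then r else m) = r := by omega
      have hpm : pvPmax m (r :: rs) = r :: pvPmax r rs := by rw [pvPmax, hm']
      rw [if_neg hrm, hpm]
      have hlast' : (preP ++ [r]).getLast (by simp) = r := by simp
      have := ih (pre ++ [r]) (preP ++ [r]) acc r (by simp [hlen]) (by simp) hlast'
      rw [pvSpec, if_neg hrm]
      simpa [List.append_assoc, add_assoc, add_comm, add_left_comm] using this

theorem pvDict_getD_nonneg (l : List (Int × String)) :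
    ∀ (d : PySem.Dict String Int),
    (∀ (k : String) (dflt : Int), 0 ≤ dflt → 0 ≤ d.getD k dflt) →
    (∀ p ∈ l, 0 ≤ p.1) →
    ∀ (k : String) (dflt : Int), 0 ≤ dflt →
    0 ≤ (l.foldl (fun d (p : Int × String) => d.insert p.2 p.1) d).getD k dflt := by
  induction l with
  | nil => intro d hd _ k dflt h; exact hd k dflt h
  | cons p l ih =>
    intro d hd hl k dflt h
    rw [List.foldl_cons]
    refine ih _ ?_ (fun q hq => hl q (List.mem_cons_of_mem _ hq)) k dflt h
    intro k' dflt' h'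
    rw [PySem.Dict.getD_insert]
    split
    · exact hl p (List.mem_cons_self ..)
    · exact hd k' dflt' h'

theorem pvRank_nonneg (expected_order : List String) (c : String) :
    0 ≤ ((PySem.List.enumerate expected_order 0).foldl
          (fun d p => d.insert p.2 p.1) PySem.Dict.empty).getD c ((expected_order.length : Nat) : Int) := by
  refine pvDict_getD_nonneg _ PySem.Dict.empty ?_ ?_ c _ (by positivity)
  · intro k dflt h; simpa [pysem] using h
  · intro p hp
    obtain ⟨k, hk, rfl⟩ := (PySem.List.mem_enumerate_iff _ _ _).1 hp
    simp

theorem pvMain (cats : List String) (om : PySem.Dict String Int) (n : Int)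
    (hC : cats ≠ []) (hnn : ∀ c, 0 ≤ om.getD c n) :
    ((PySem.List.enumerate cats 0).foldl
      (fun (st : Int × List Int) p =>
        let rank := om.getD p.2 n
        if rank < st.1 then (st.1, st.2 ++ [p.1]) else (rank, st.2)) (-1, [])).2
    = (PySem.List.pyRange 1 ((cats.map (fun c => om.getD c n)).length : Int) 1).foldl
      (fun acc i =>
        if PySem.List.pyGetD (cats.map (fun c => om.getD c n)) i 0 <
           PySem.List.pyGetD ((cats.map (fun c => om.getD c n)).foldl
             (fun (st : Int × List Int) r =>
               let m := if r > st.1 then r else st.1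
               (m, st.2 ++ [m])) (-1, [])).2 (i - 1) 0
        then acc ++ [i] else acc) [] := by
  have hA := pvAscan (cats.map (fun c => om.getD c n)) 0 (-1) []
  rw [pvEnumerate_map, List.foldl_map] at hA
  have hAfun : (fun (st : Int × List Int) (p : Int × String) => pvStepA st (p.1, om.getD p.2 n))
      = fun (st : Int × List Int) p =>
        let rank := om.getD p.2 n
        if rank < st.1 then (st.1, st.2 ++ [p.1]) else (rank, st.2) := by
    funext st p; simp [pvStepA]
  rw [hAfun, List.nil_append] at hA
  rw [hA, pvPmaxFold, List.nil_append]
  obtain ⟨c0, ctail, rfl⟩ := List.exists_cons_of_ne_nil hC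
  have hr0 : 0 ≤ om.getD c0 n := hnn c0
  rw [List.map_cons]
  have hpmHead : pvPmax (-1) (om.getD c0 n :: ctail.map (fun c => om.getD c n))
      = om.getD c0 n :: pvPmax (om.getD c0 n) (ctail.map (fun c => om.getD c n)) := by
    rw [pvPmax, if_pos (by omega)]
  rw [hpmHead, pvSpec, if_neg (by omega)]
  have hB := pvBscan (ctail.map (fun c => om.getD c n)) [om.getD c0 n] [om.getD c0 n] []
    (om.getD c0 n) rfl (by simp) (by simp)
  simp only [List.length_cons, List.length_nil, List.length_map,
    List.singleton_append, List.nil_append, Nat.add_comm 1] at hB ⊢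
  norm_num at hB ⊢
  exact hB.symm

-- ===== VERDICT (by name: the statement is the Claim_ definition above) =====
theorem check_import_order_spec : Claim_equal_check_import_order := by
  intro categories expected_order _
  unfold Spec_check_import_order check_import_order check_import_order_alt
  by_cases hguard : expected_order = [] ∨ categories = []
  · simp [hguard]
  · rw [if_neg hguard, if_neg hguard]
    rw [not_or] at hguard
    exact pvMain categories _ ((expected_order.length : Nat) : Int) hguard.2
      (fun c => pvRank_nonneg expected_order c)
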